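-- pv_equiv track=rewrite | github.com/rohitkakkar6/AI-planning-vs-CSP-Solving-Comparison | PDDL_parser/pDB_solve.py | target_path
-- ===== SOURCE A (Python) =====
-- def target_path(paths, target):
--     """
--     Searches for complete paths that contain the target cell anywhere within them.
--
--     Parameters:
--         paths (list): A list of paths.
--         target (str): The target cell to search for in the paths.
--
--     Returns:
--         list or None: If paths containing the target and reaching the goal cell are found, returns the part of the path from the target cell onwards. Otherwise, returns None.
--     """
--     # Search for complete paths that contain the target anywhere within them
--     target_paths = [path for path in paths if target in path and path[-1] == "cellx0y0"]
--
--     if target_paths: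
--         # extract the part of the path from the target onwards
--         shortest_path_containing_target = min(target_paths, key=len)
--         target_index = shortest_path_containing_target.index(target)
--
--         # return the part of the path from the target onwards
--         path_from_target = shortest_path_containing_target[target_index:]
--         return path_from_target
--     else:
--         return None
-- ===== SOURCE B (Python) =====
-- def target_path(paths, target):
--     """Sort-then-scan: stably sort paths by length, return the suffix of the
--     first qualifying path (stability makes it the same path min(key=len) picks)."""
--     for path in sorted(paths, key=len):
--         if target in path and path[-1] == "cellx0y0":
--             while path and path[0] != target:
--                 path = path[1:]
--             return path
--     return None
-- ===== Notes on version B (the rewrite author's own statement) =====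
-- stated objective: alternative
-- what changed: Replaced the filter+min(key=len)+index pipeline with sort-then-scan: stably sort all paths by length once, return on the first qualifying path (stability reproduces min's first-minimum tie-break), and extract the suffix by a dropwhile loop instead of index+slice.
import Mathlib
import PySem

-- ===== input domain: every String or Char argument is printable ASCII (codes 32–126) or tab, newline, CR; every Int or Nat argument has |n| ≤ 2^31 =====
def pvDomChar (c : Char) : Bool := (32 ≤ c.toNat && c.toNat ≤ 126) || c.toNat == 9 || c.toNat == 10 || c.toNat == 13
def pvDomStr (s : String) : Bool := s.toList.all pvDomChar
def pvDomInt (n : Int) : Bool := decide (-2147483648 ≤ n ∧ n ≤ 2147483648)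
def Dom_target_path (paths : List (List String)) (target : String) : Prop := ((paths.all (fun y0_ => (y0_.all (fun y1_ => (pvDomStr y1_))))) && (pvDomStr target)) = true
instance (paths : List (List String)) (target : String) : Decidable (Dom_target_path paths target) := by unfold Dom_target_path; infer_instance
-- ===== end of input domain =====

-- B replaces A's filter/min(key=len)/index pipeline with sort-then-scan: stably sort by length, take the first qualifying path, strip its prefix by a dropwhile loop (alternative algorithm, same return value).

-- ===== PORT A =====
def target_path (paths : List (List String)) (target : String) : Option (List String) :=
  -- target_paths = [path for path in paths if target in path and path[-1] == "cellx0y0"]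
  let target_paths := paths.filter
    (fun path => path.contains target && (PySem.List.pyGet? path (-1) == some "cellx0y0"))
  if target_paths.isEmpty then
    none
  else
    -- shortest_path_containing_target = min(target_paths, key=len)
    match PySem.List.min? target_paths (fun p => p.length) with
    | none => none        -- unreachable: target_paths ≠ []
    | some sp =>
      -- target_index = shortest_path_containing_target.index(target)
      match PySem.List.index? sp target with
      | none => none      -- unreachable: target ∈ sp
      | some i => some (PySem.List.slice sp (some (i : Int)) none)  -- sp[i:]

-- ===== PORT B =====
-- Source B's 'while path and path[0] != target: path = path[1:]' loop
def tpSuffix (target : String) : List String → List String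
  | [] => []
  | c :: rest => if c ≠ target then tpSuffix target rest else c :: rest

def target_path_alt (paths : List (List String)) (target : String) : Option (List String) :=
  -- for path in sorted(paths, key=len): … return …  /  return None after the loop
  match (PySem.List.sorted paths (fun p => p.length)).find?
      (fun path => path.contains target && (PySem.List.pyGet? path (-1) == some "cellx0y0")) with
  | some path => some (tpSuffix target path)
  | none => none

-- ===== PRECONDITION & SPEC =====
def Spec_target_path (paths : List (List String)) (target : String) (out : Option (List String)) : Prop := out = target_path_alt paths target
instance (paths : List (List String)) (target : String) (out : Option (List String)) : Decidable (Spec_target_path paths target out) := by unfold Spec_target_path; infer_instance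

-- ===== CLAIM (what is proved, stated in full; the proofs are below) =====
def Claim_equal_target_path : Prop := ∀ (paths : List (List String)) (target : String), Dom_target_path paths target → Spec_target_path paths target (target_path paths target)

-- ===== LEMMAS AND PROOFS =====

-- inserting x into a key-sorted acc: the first q-element of the result is min?'s step applied to the first q-element of acc
theorem find?_insertBy {α : Type} (key : α → Nat) (q : α → Bool) (x : α) (acc : List α)
    (h : acc.Pairwise (fun a b => key a ≤ key b)) :
    (PySem.List.insertBy (fun a b => decide (key a < key b)) x acc).find? q =
      if q x then
        match acc.find? q with
        | none => some x
        | some m => if key x < key m then some x else some m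
      else acc.find? q := by
  induction acc with
  | nil =>
    simp [PySem.List.insertBy, List.find?]
  | cons y ys ih =>
    rw [List.pairwise_cons] at h
    obtain ⟨hy, hys⟩ := h
    by_cases hlt : key x < key y
    · have hins : PySem.List.insertBy (fun a b => decide (key a < key b)) x (y :: ys) =
          x :: y :: ys := by simp [PySem.List.insertBy, hlt]
      rw [hins]
      by_cases hq : q x
      · rw [List.find?_cons_of_pos hq, if_pos hq]
        cases hfy : (y :: ys).find? q with
        | none => rfl
        | some m =>
          have hm : m ∈ y :: ys := List.mem_of_find?_eq_some hfy
          have hxm : key x < key m := by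
            rcases List.mem_cons.mp hm with rfl | hm'
            · exact hlt
            · exact lt_of_lt_of_le hlt (hy m hm')
          simp [hxm]
      · rw [List.find?_cons_of_neg hq, if_neg hq]
    · have hins : PySem.List.insertBy (fun a b => decide (key a < key b)) x (y :: ys) =
          y :: PySem.List.insertBy (fun a b => decide (key a < key b)) x ys := by
        simp [PySem.List.insertBy, hlt]
      rw [hins]
      by_cases hqy : q y
      · rw [List.find?_cons_of_pos hqy, List.find?_cons_of_pos hqy]
        by_cases hq : q x <;> simp [hq, hlt]
      · rw [List.find?_cons_of_neg hqy, List.find?_cons_of_neg hqy]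
        exact ih hys

-- first qualifying path in sorted order = first minimal-length qualifying path in original order
theorem find?_sorted_eq_min? {α : Type} (key : α → Nat) (q : α → Bool) (xs : List α) :
    (PySem.List.sorted xs key).find? q = PySem.List.min? (xs.filter q) key := by
  induction xs using List.reverseRecOn with
  | nil => rfl
  | append_singleton xs x ih =>
    have hsorted : PySem.List.sorted (xs ++ [x]) key =
        PySem.List.insertBy (fun a b => decide (key a < key b)) x (PySem.List.sorted xs key) := by
      rw [PySem.List.sorted_eq_foldl_insertBy, PySem.List.sorted_eq_foldl_insertBy,
        List.foldl_append]
      rfl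
    rw [hsorted, find?_insertBy key q x _ (PySem.List.sorted_pairwise xs key), ih]
    by_cases hq : q x
    · simp only [if_true, List.filter_append, List.filter_cons, hq, List.filter_nil]
      simp only [PySem.List.min?, List.foldl_append, List.foldl_cons, List.foldl_nil]
      cases (xs.filter q).foldl
          (fun acc y => match acc with
            | none => some y
            | some m => if key y < key m then some y else some m)
          (none : Option α) with
      | none => rfl
      | some m => rfl
    · simp [hq, List.filter_append, List.filter_nil]

-- A's index+slice suffix = B's dropwhile suffix, whenever the target occurs
theorem suffix_eq (target : String) (sp : List String) (h : target ∈ sp) :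
    (match PySem.List.index? sp target with
     | none => (none : Option (List String))
     | some i => some (PySem.List.slice sp (some (i : Int)) none)) =
      some (tpSuffix target sp) := by
  induction sp with
  | nil => cases h
  | cons c rest ih =>
    by_cases hc : c = target
    · subst hc
      have hidx : PySem.List.index? (c :: rest) c = some 0 := by
        simp [PySem.List.index?, List.idxOf?_cons]
      rw [hidx]
      simp [tpSuffix]
    · have hmem : target ∈ rest := by
        rcases List.mem_cons.mp h with rfl | hm
        · exact absurd rfl hc
        · exact hm
      have hbeq : (c == target) = false := by simp [hc]
      have hidx : PySem.List.index? (c :: rest) target =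
          (PySem.List.index? rest target).map (· + 1) := by
        simp [PySem.List.index?, List.idxOf?_cons, hbeq]
      rw [hidx]
      cases hr : PySem.List.index? rest target with
      | none =>
        rw [hr] at ih
        exact absurd (ih hmem) (by simp)
      | some i =>
        rw [hr] at ih
        have hrec := ih hmem
        simp only [Option.map_some] at *
        have hslice : PySem.List.slice (c :: rest) (some ((i + 1 : Nat) : Int)) none =
            PySem.List.slice rest (some ((i : Nat) : Int)) none := by
          rw [PySem.List.slice_from_natCast, PySem.List.slice_from_natCast]
          simp [List.drop_succ_cons]
        have hsfx : tpSuffix target (c :: rest) = tpSuffix target rest := by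
          simp [tpSuffix, hc]
        rw [hslice, hsfx]
        exact hrec

-- ===== VERDICT (by name: the statement is the Claim_ definition above) =====
theorem target_path_spec : Claim_equal_target_path := by
  intro paths target _
  unfold Spec_target_path target_path target_path_alt
  rw [find?_sorted_eq_min?]
  set q := fun path : List String =>
    path.contains target && (PySem.List.pyGet? path (-1) == some "cellx0y0") with hq
  by_cases he : (paths.filter q).isEmpty
  · rw [if_pos he]
    rw [(PySem.List.min?_eq_none_iff (paths.filter q) (fun p => p.length)).mpr
      (List.isEmpty_iff.mp he)]
  · rw [if_neg he]
    cases hm : PySem.List.min? (paths.filter q) (fun p => p.length) with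
    | none =>
      exact absurd ((PySem.List.min?_eq_none_iff _ _).mp hm)
        (by simpa [List.isEmpty_iff] using he)
    | some sp =>
      have hmem : sp ∈ paths.filter q := PySem.List.min?_mem hm
      have hqsp : q sp = true := (List.mem_filter.mp hmem).2
      have hcont : target ∈ sp := by
        rw [hq] at hqsp
        simp only [Bool.and_eq_true] at hqsp
        simpa using hqsp.1
      exact suffix_eq target sp hcont
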